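-- pv_equiv track=rewrite | github.com/CryptoPrism-io/instagram-automation-research | src/examples/content_creators/post_scheduler.py | _generate_timing_recommendations
-- ===== SOURCE A (Python) =====
-- from typing import Dict, List, Any
--
-- def _generate_timing_recommendations(sorted_hours: List) -> List[str]:
--     """Generate timing recommendations based on analysis"""
--     recommendations = []
--
--     if sorted_hours:
--         best_hour = sorted_hours[0][0]
--         recommendations.append(f"Best performing hour: {best_hour}:00")
--
--         # Group by time periods
--         morning_hours = [h for h, _ in sorted_hours if 6 <= h <= 11]
--         afternoon_hours = [h for h, _ in sorted_hours if 12 <= h <= 17]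
--         evening_hours = [h for h, _ in sorted_hours if 18 <= h <= 23]
--
--         if morning_hours:
--             recommendations.append(f"Best morning time: {morning_hours[0]}:00")
--         if afternoon_hours:
--             recommendations.append(f"Best afternoon time: {afternoon_hours[0]}:00")
--         if evening_hours:
--             recommendations.append(f"Best evening time: {evening_hours[0]}:00")
--
--     return recommendations
-- ===== SOURCE B (Python) =====
-- def _generate_timing_recommendations(sorted_hours):
--     """Single forward pass: remember the first hour seen in each of the
--     morning/afternoon/evening bands instead of building three filtered lists."""
--     if not sorted_hours:
--         return []
--     morning = afternoon = evening = None
--     for h, _ in sorted_hours: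
--         if morning is None and 6 <= h <= 11:
--             morning = h
--         elif afternoon is None and 12 <= h <= 17:
--             afternoon = h
--         elif evening is None and 18 <= h <= 23:
--             evening = h
--     recs = [f"Best performing hour: {sorted_hours[0][0]}:00"]
--     if morning is not None:
--         recs.append(f"Best morning time: {morning}:00")
--     if afternoon is not None:
--         recs.append(f"Best afternoon time: {afternoon}:00")
--     if evening is not None:
--         recs.append(f"Best evening time: {evening}:00")
--     return recs
-- ===== Notes on version B (the rewrite author's own statement) =====
-- stated objective: alternative
-- what changed: Replaces A's three full filtered-list comprehensions over sorted_hours by one forward pass that keeps first-seen morning/afternoon/evening slots (Option-valued), appending the recommendation strings afterwards.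
import Mathlib
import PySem

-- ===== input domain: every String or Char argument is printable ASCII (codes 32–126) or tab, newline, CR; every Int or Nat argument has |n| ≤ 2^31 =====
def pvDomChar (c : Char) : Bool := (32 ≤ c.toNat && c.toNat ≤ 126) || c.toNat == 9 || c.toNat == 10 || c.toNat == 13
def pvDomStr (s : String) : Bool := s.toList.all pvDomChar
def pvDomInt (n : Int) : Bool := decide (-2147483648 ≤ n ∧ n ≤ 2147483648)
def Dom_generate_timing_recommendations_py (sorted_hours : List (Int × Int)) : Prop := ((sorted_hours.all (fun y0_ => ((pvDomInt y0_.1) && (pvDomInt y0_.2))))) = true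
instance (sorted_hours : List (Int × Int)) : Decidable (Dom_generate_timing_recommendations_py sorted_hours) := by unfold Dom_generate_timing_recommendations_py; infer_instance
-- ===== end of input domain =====

-- B replaces A's three filtered-list passes with one forward loop keeping first-seen band slots (objective: alternative decomposition, same O(n) cost).

-- ===== PORT A =====
def generate_timing_recommendations_py (sorted_hours : List (Int × Int)) : List String :=
  let recommendations : List String := []
  match sorted_hours with
  | [] => recommendations
  | (best_hour, _) :: _ =>
    let recommendations := recommendations ++ ["Best performing hour: " ++ PySem.Int.toStr best_hour ++ ":00"]
    let morning_hours := (sorted_hours.filter (fun p => decide (6 ≤ p.1) && decide (p.1 ≤ 11))).map Prod.fst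
    let afternoon_hours := (sorted_hours.filter (fun p => decide (12 ≤ p.1) && decide (p.1 ≤ 17))).map Prod.fst
    let evening_hours := (sorted_hours.filter (fun p => decide (18 ≤ p.1) && decide (p.1 ≤ 23))).map Prod.fst
    let recommendations := match morning_hours with
      | [] => recommendations
      | h :: _ => recommendations ++ ["Best morning time: " ++ PySem.Int.toStr h ++ ":00"]
    let recommendations := match afternoon_hours with
      | [] => recommendations
      | h :: _ => recommendations ++ ["Best afternoon time: " ++ PySem.Int.toStr h ++ ":00"]
    match evening_hours with
    | [] => recommendations
    | h :: _ => recommendations ++ ["Best evening time: " ++ PySem.Int.toStr h ++ ":00"]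

-- ===== PORT B =====
-- the single forward pass of Source B: first-seen slot per band
def pvSlots : List (Int × Int) → Option Int → Option Int → Option Int → (Option Int × Option Int × Option Int)
  | [], m, a, e => (m, a, e)
  | (h, _) :: rest, m, a, e =>
    if m = none ∧ 6 ≤ h ∧ h ≤ 11 then pvSlots rest (some h) a e
    else if a = none ∧ 12 ≤ h ∧ h ≤ 17 then pvSlots rest m (some h) e
    else if e = none ∧ 18 ≤ h ∧ h ≤ 23 then pvSlots rest m a (some h)
    else pvSlots rest m a e

def generate_timing_recommendations_py_alt (sorted_hours : List (Int × Int)) : List String :=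
  match sorted_hours with
  | [] => []
  | (best, _) :: _ =>
    let slots := pvSlots sorted_hours none none none
    let recs := ["Best performing hour: " ++ PySem.Int.toStr best ++ ":00"]
    let recs := match slots.1 with
      | none => recs
      | some h => recs ++ ["Best morning time: " ++ PySem.Int.toStr h ++ ":00"]
    let recs := match slots.2.1 with
      | none => recs
      | some h => recs ++ ["Best afternoon time: " ++ PySem.Int.toStr h ++ ":00"]
    match slots.2.2 with
    | none => recs
    | some h => recs ++ ["Best evening time: " ++ PySem.Int.toStr h ++ ":00"]

-- ===== PRECONDITION & SPEC =====
def Spec_generate_timing_recommendations_py (sorted_hours : List (Int × Int)) (out : List String) : Prop := out = generate_timing_recommendations_py_alt sorted_hours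
instance (sorted_hours : List (Int × Int)) (out : List String) : Decidable (Spec_generate_timing_recommendations_py sorted_hours out) := by unfold Spec_generate_timing_recommendations_py; infer_instance

-- ===== CLAIM (what is proved, stated in full; the proofs are below) =====
def Claim_equal_generate_timing_recommendations_py : Prop := ∀ (sorted_hours : List (Int × Int)), Dom_generate_timing_recommendations_py sorted_hours → Spec_generate_timing_recommendations_py sorted_hours (generate_timing_recommendations_py sorted_hours)

-- ===== LEMMAS AND PROOFS =====

-- the first element of each band in the list, as an Option (what A's "morning_hours[0] if nonempty" extracts)
def pvFirstBand (lo hi : Int) (xs : List (Int × Int)) : Option Int :=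
  (xs.find? (fun p => decide (lo ≤ p.1) && decide (p.1 ≤ hi))).map Prod.fst

theorem pvFirstBand_cons (lo hi h t : Int) (rest : List (Int × Int)) :
    pvFirstBand lo hi ((h, t) :: rest) =
      if lo ≤ h ∧ h ≤ hi then some h else pvFirstBand lo hi rest := by
  simp only [pvFirstBand, List.find?_cons]
  by_cases hb : lo ≤ h ∧ h ≤ hi
  · simp [hb]
  · rcases not_and_or.mp hb with hc | hc <;> simp [hc]

set_option maxHeartbeats 2000000 in
theorem pvSlots_spec (xs : List (Int × Int)) : ∀ m a e, pvSlots xs m a e =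
    (m.or (pvFirstBand 6 11 xs), a.or (pvFirstBand 12 17 xs), e.or (pvFirstBand 18 23 xs)) := by
  induction xs with
  | nil => intro m a e; simp [pvSlots, pvFirstBand]
  | cons p rest ih =>
    obtain ⟨h, t⟩ := p
    intro m a e
    simp only [pvSlots, ih, pvFirstBand_cons]
    clear ih
    by_cases h1 : 6 ≤ h ∧ h ≤ 11 <;> by_cases h2 : 12 ≤ h ∧ h ≤ 17 <;> by_cases h3 : 18 ≤ h ∧ h ≤ 23 <;>
      first
      | omega
      | (cases m <;> cases a <;> cases e <;> split_ifs <;> simp_all [Option.or])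

theorem head?_filter_map (q : Int × Int → Bool) (ys : List (Int × Int)) :
    ((ys.filter q).map Prod.fst).head? = (ys.find? q).map Prod.fst := by
  induction ys with
  | nil => rfl
  | cons p rest ih =>
    by_cases hq : q p <;> simp [hq, ih]

theorem match_list_head? (l : List Int) (r : List String) (g : Int → String) :
    (match l with | [] => r | h :: _ => r ++ [g h]) =
    (match l.head? with | none => r | some h => r ++ [g h]) := by
  cases l <;> rfl

-- ===== VERDICT (by name: the statement is the Claim_ definition above) =====
theorem generate_timing_recommendations_py_spec : Claim_equal_generate_timing_recommendations_py := by
  intro xs _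
  unfold Spec_generate_timing_recommendations_py
  cases xs with
  | nil => rfl
  | cons p rest =>
    obtain ⟨h, t⟩ := p
    simp only [generate_timing_recommendations_py, generate_timing_recommendations_py_alt,
      pvSlots_spec, Option.none_or, List.nil_append]
    rw [match_list_head?, match_list_head?, match_list_head?,
      head?_filter_map, head?_filter_map, head?_filter_map]
    rfl
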